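-- pv_equiv track=rewrite | github.com/TerryMXJ/doc-generate | project/knowledge_service.py | split_and_sort_directive
-- ===== SOURCE A (Python) =====
-- def split_and_sort_directive(directive_list: list):
--     new_directive_set = set()
--     for item in directive_list:
--         for sentence_item in item.split(". "):
--             for atomic_directive in sentence_item.split(" || "):
--                 new_directive_set.add(atomic_directive)
--     new_directive_list = list(new_directive_set)
--     new_directive_list.sort(key=lambda directive: len(directive))
--     return new_directive_list
-- ===== SOURCE B (Python) =====
-- def split_and_sort_directive(directive_list: list):
--     # One-pass scanner over each item: tokens are cut at every leftmost
--     # occurrence of ". " or " || ", instead of two nested split passes.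
--     tokens = set()
--     for item in directive_list:
--         cur = []
--         i, n = 0, len(item)
--         while i < n:
--             if item.startswith(". ", i):
--                 tokens.add("".join(cur))
--                 cur = []
--                 i += 2
--             elif item.startswith(" || ", i):
--                 tokens.add("".join(cur))
--                 cur = []
--                 i += 4
--             else:
--                 cur.append(item[i])
--                 i += 1
--         tokens.add("".join(cur))
--     return sorted(tokens, key=len)
-- ===== Notes on version B (the rewrite author's own statement) =====
-- stated objective: alternative
-- what changed: Replaces the two nested split passes per item with a single left-to-right scanner that cuts a token at every leftmost occurrence of ". " or " || ", adding tokens to the set as it goes.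
import Mathlib
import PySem

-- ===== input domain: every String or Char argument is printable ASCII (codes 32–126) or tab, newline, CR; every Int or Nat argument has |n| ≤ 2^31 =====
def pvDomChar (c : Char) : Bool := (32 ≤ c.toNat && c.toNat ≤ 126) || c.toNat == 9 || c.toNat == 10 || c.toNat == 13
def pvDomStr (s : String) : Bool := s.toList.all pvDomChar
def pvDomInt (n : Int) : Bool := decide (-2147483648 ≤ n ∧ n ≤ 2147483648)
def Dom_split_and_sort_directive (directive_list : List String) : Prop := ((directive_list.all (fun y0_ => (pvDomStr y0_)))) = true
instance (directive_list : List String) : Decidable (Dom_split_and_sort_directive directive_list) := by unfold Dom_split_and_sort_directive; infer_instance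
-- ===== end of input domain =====

-- B replaces A's two nested split passes by a single left-to-right scanner cutting tokens
-- at each leftmost ". " / " || " occurrence (objective: alternative decomposition, same cost).
-- The returned LIST order among equal-length tokens follows the ports' shared insertion-order
-- set model; the Python results are compared as sets (A's Python iterates a hash set).

-- ===== PORT A =====
def split_and_sort_directive (directive_list : List String) : List String :=
  let s :=
    directive_list.foldl (fun st item =>
      (PySem.Chars.splitOn item.toList ['.', ' ']).foldl (fun st sentence_item =>
        (PySem.Chars.splitOn sentence_item [' ', '|', '|', ' ']).foldl (fun st atomic_directive =>
          PySem.Set.add st (String.ofList atomic_directive)) st) st) PySem.Set.empty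
  PySem.List.sorted s (fun directive => PySem.Str.len directive) false

-- ===== PORT B =====
-- the while-loop scanner of Source B: cur is the pending token (reversed), tokens the set so far
def pvScan : List Char → List Char → PySem.Set String → PySem.Set String
  | [], cur, s => PySem.Set.add s (String.ofList cur.reverse)
  | c :: rest, cur, s =>
    if ['.', ' '].isPrefixOf (c :: rest) then
      pvScan ((c :: rest).drop 2) [] (PySem.Set.add s (String.ofList cur.reverse))
    else if [' ', '|', '|', ' '].isPrefixOf (c :: rest) then
      pvScan ((c :: rest).drop 4) [] (PySem.Set.add s (String.ofList cur.reverse))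
    else
      pvScan rest (c :: cur) s
termination_by l _ _ => l.length
decreasing_by all_goals (simp; try omega)

def split_and_sort_directive_alt (directive_list : List String) : List String :=
  let tokens := directive_list.foldl (fun s item => pvScan item.toList [] s) PySem.Set.empty
  PySem.List.sorted tokens (fun directive => PySem.Str.len directive) false

-- ===== PRECONDITION & SPEC =====
def Spec_split_and_sort_directive (directive_list : List String) (out : List String) : Prop := out = split_and_sort_directive_alt directive_list
instance (directive_list : List String) (out : List String) : Decidable (Spec_split_and_sort_directive directive_list out) := by unfold Spec_split_and_sort_directive; infer_instance

-- ===== CLAIM (what is proved, stated in full; the proofs are below) =====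
def Claim_equal_split_and_sort_directive : Prop := ∀ (directive_list : List String), Dom_split_and_sort_directive directive_list → Spec_split_and_sort_directive directive_list (split_and_sort_directive directive_list)

-- ===== LEMMAS AND PROOFS =====

def pvMapHead (f : List Char → List Char) : List (List Char) → List (List Char)
  | [] => []
  | t :: ts => f t :: ts

-- clean structural model of PySem.Chars.splitOn for a nonempty separator
def pvSp (sep : List Char) (hne : sep ≠ []) : List Char → List (List Char)
  | [] => [[]]
  | c :: rest =>
    if sep.isPrefixOf (c :: rest) then [] :: pvSp sep hne ((c :: rest).drop sep.length)
    else pvMapHead (fun t => c :: t) (pvSp sep hne rest)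
termination_by l => l.length
decreasing_by
  · have : 1 ≤ sep.length := by
      cases sep with | nil => exact absurd rfl hne | cons a b => simp
    simp only [List.length_drop, List.length_cons]; omega
  · simp

theorem pvSp_nil (sep : List Char) (hne : sep ≠ []) : pvSp sep hne [] = [[]] := by
  rw [pvSp.eq_def]

theorem pvSp_cons (sep : List Char) (hne : sep ≠ []) (c : Char) (rest : List Char) :
    pvSp sep hne (c :: rest) =
      if sep.isPrefixOf (c :: rest) then [] :: pvSp sep hne ((c :: rest).drop sep.length)
      else pvMapHead (fun t => c :: t) (pvSp sep hne rest) := by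
  rw [pvSp.eq_def]

theorem pvSp_ne_nil (sep : List Char) (hne : sep ≠ []) (l : List Char) :
    pvSp sep hne l ≠ [] := by
  fun_induction pvSp sep hne l with
  | case1 => simp
  | case2 c rest h ih => simp
  | case3 c rest h ih =>
    cases hsp : pvSp sep hne rest with
    | nil => exact absurd hsp ih
    | cons t ts => simp [hsp, pvMapHead]

theorem pvSp_head_prefix (sep : List Char) (hne : sep ≠ []) (l : List Char)
    (t : List Char) (ts : List (List Char)) (h : pvSp sep hne l = t :: ts) : t <+: l := by
  fun_induction pvSp sep hne l generalizing t ts with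
  | case1 => cases h; simp
  | case2 c rest hp ih => cases h; simp
  | case3 c rest hp ih =>
    cases hsp : pvSp sep hne rest with
    | nil => exact absurd hsp (pvSp_ne_nil sep hne rest)
    | cons u us =>
      rw [hsp] at h
      simp only [pvMapHead, List.cons.injEq] at h
      obtain ⟨h1, h2⟩ := h
      subst h1
      subst h2
      exact List.cons_prefix_cons.mpr ⟨rfl, ih u us hsp⟩

theorem pvGo_eq (sep : List Char) (hne : sep ≠ []) :
    ∀ (fuel : Nat) (l cur : List Char) (acc : List (List Char)), l.length < fuel →
      PySem.Chars.splitOn.go sep fuel l cur acc =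
        acc.reverse ++ pvMapHead (fun t => cur.reverse ++ t) (pvSp sep hne l) := by
  intro fuel
  induction fuel with
  | zero => intro l cur acc h; omega
  | succ fuel ih =>
    intro l cur acc h
    cases l with
    | nil =>
      simp [PySem.Chars.splitOn.go, pvSp_nil, pvMapHead]
    | cons c rest =>
      rw [PySem.Chars.splitOn.go]
      by_cases hp : sep.isPrefixOf (c :: rest) = true
      · rw [if_pos hp]
        have hs : 1 ≤ sep.length := by
          cases sep with | nil => exact absurd rfl hne | cons a b => simp
        rw [ih ((c :: rest).drop sep.length) [] (cur.reverse :: acc)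
          (by simp only [List.length_drop, List.length_cons] at *; omega)]
        rw [pvSp_cons, if_pos hp]
        cases hsp : pvSp sep hne ((c :: rest).drop sep.length) with
        | nil => exact absurd hsp (pvSp_ne_nil sep hne _)
        | cons t ts => simp [pvMapHead]
      · rw [if_neg hp]
        rw [ih rest (c :: cur) acc (by simp only [List.length_cons] at *; omega)]
        rw [pvSp_cons, if_neg hp]
        cases hsp : pvSp sep hne rest with
        | nil => exact absurd hsp (pvSp_ne_nil sep hne rest)
        | cons t ts => simp [pvMapHead]

theorem pvSplitOn_eq (sep : List Char) (hne : sep ≠ []) (l : List Char) :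
    PySem.Chars.splitOn l sep = pvSp sep hne l := by
  rw [PySem.Chars.splitOn, pvGo_eq sep hne (l.length + 1) l [] [] (by omega)]
  cases hsp : pvSp sep hne l with
  | nil => exact absurd hsp (pvSp_ne_nil sep hne l)
  | cons t ts => simp [pvMapHead]

-- nonemptiness of the two separators
theorem pvD1_ne : (['.', ' '] : List Char) ≠ [] := by decide
theorem pvD2_ne : ([' ', '|', '|', ' '] : List Char) ≠ [] := by decide

-- pure token stream of B's scanner
def pvTokens : List Char → List (List Char)
  | [] => [[]]
  | c :: rest =>
    if ['.', ' '].isPrefixOf (c :: rest) then [] :: pvTokens ((c :: rest).drop 2)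
    else if [' ', '|', '|', ' '].isPrefixOf (c :: rest) then [] :: pvTokens ((c :: rest).drop 4)
    else pvMapHead (fun t => c :: t) (pvTokens rest)
termination_by l => l.length
decreasing_by all_goals (simp; try omega)

theorem pvTokens_nil : pvTokens [] = [[]] := by rw [pvTokens.eq_def]

theorem pvTokens_cons (c : Char) (rest : List Char) :
    pvTokens (c :: rest) =
      if ['.', ' '].isPrefixOf (c :: rest) then [] :: pvTokens ((c :: rest).drop 2)
      else if [' ', '|', '|', ' '].isPrefixOf (c :: rest) then [] :: pvTokens ((c :: rest).drop 4)
      else pvMapHead (fun t => c :: t) (pvTokens rest) := by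
  rw [pvTokens.eq_def]

theorem pvTokens_ne_nil (l : List Char) : pvTokens l ≠ [] := by
  fun_induction pvTokens l with
  | case1 => simp
  | case2 c rest h ih => simp
  | case3 c rest h1 h2 ih => simp
  | case4 c rest h1 h2 ih =>
    cases hts : pvTokens rest with
    | nil => exact absurd hts ih
    | cons t ts => simp [pvMapHead]

-- MAIN combinatorial lemma: the one-pass scan yields exactly the nested-split tokens
theorem pvTokens_eq (l : List Char) :
    pvTokens l = (pvSp ['.', ' '] pvD1_ne l).flatMap (pvSp [' ', '|', '|', ' '] pvD2_ne) := by
  fun_induction pvTokens l with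
  | case1 => simp [pvSp_nil]
  | case2 c rest h ih =>
    rw [pvSp_cons, if_pos h]
    simp only [List.flatMap_cons, pvSp_nil]
    rw [ih]
    rfl
  | case3 c rest h1 h2 ih =>
    obtain ⟨r, hr⟩ : ∃ r, c :: rest = ' ' :: '|' :: '|' :: ' ' :: r := by
      obtain ⟨r, hr⟩ := (List.isPrefixOf_iff_prefix).mp h2
      exact ⟨r, hr.symm⟩
    rw [hr] at ih ⊢
    simp only [List.drop_succ_cons, List.drop_zero] at ih ⊢
    cases hsp : pvSp ['.', ' '] pvD1_ne r with
    | nil => exact absurd hsp (pvSp_ne_nil _ _ _)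
    | cons t ts =>
      have e1 : pvSp ['.', ' '] pvD1_ne (' ' :: '|' :: '|' :: ' ' :: r)
          = (' ' :: '|' :: '|' :: ' ' :: t) :: ts := by
        rw [pvSp_cons, if_neg (by simp [List.isPrefixOf]),
            pvSp_cons, if_neg (by simp [List.isPrefixOf]),
            pvSp_cons, if_neg (by simp [List.isPrefixOf]),
            pvSp_cons, if_neg (by simp [List.isPrefixOf]), hsp]
        rfl
      have e2 : pvSp [' ', '|', '|', ' '] pvD2_ne (' ' :: '|' :: '|' :: ' ' :: t)
          = [] :: pvSp [' ', '|', '|', ' '] pvD2_ne t := by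
        rw [pvSp_cons, if_pos (by simp [List.isPrefixOf])]
        rfl
      rw [e1, ih, hsp]
      simp only [List.flatMap_cons, e2, List.cons_append]
  | case4 c rest h1 h2 ih =>
    rw [pvSp_cons, if_neg h1]
    cases hsp : pvSp ['.', ' '] pvD1_ne rest with
    | nil => exact absurd hsp (pvSp_ne_nil _ _ _)
    | cons t ts =>
      have htp : t <+: rest := pvSp_head_prefix _ _ _ _ _ hsp
      have hnp : ¬ [' ', '|', '|', ' '].isPrefixOf (c :: t) = true := by
        intro hc
        exact h2 ((List.isPrefixOf_iff_prefix).mpr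
          (((List.isPrefixOf_iff_prefix).mp hc).trans (List.cons_prefix_cons.mpr ⟨rfl, htp⟩)))
      rw [ih, hsp]
      simp only [pvMapHead, List.flatMap_cons]
      rw [pvSp_cons, if_neg hnp]
      cases hsp2 : pvSp [' ', '|', '|', ' '] pvD2_ne t with
      | nil => exact absurd hsp2 (pvSp_ne_nil _ _ _)
      | cons u us => simp [pvMapHead]

-- scanner with set accumulation = Set.update with the token stream
theorem pvScan_eq (l cur : List Char) (s : PySem.Set String) :
    pvScan l cur s =
      PySem.Set.update s ((pvMapHead (fun t => cur.reverse ++ t) (pvTokens l)).map String.ofList) := by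
  fun_induction pvScan l cur s with
  | case1 cur s => simp [pvTokens_nil, pvMapHead, PySem.Set.update_cons, PySem.Set.update_nil]
  | case2 c rest cur s h ih =>
    simp only [List.unattach_reverse, List.unattach_attach] at ih
    rw [ih, pvTokens_cons]
    rw [if_pos h]
    cases hts : pvTokens ((c :: rest).drop 2) with
    | nil => exact absurd hts (pvTokens_ne_nil _)
    | cons t ts => simp [pvMapHead, PySem.Set.update_cons]
  | case3 c rest cur s h1 h2 ih =>
    simp only [List.unattach_reverse, List.unattach_attach] at ih
    rw [ih, pvTokens_cons]
    rw [if_neg h1, if_pos h2]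
    cases hts : pvTokens ((c :: rest).drop 4) with
    | nil => exact absurd hts (pvTokens_ne_nil _)
    | cons t ts => simp [pvMapHead, PySem.Set.update_cons]
  | case4 c rest cur s h1 h2 ih =>
    rw [ih, pvTokens_cons]
    rw [if_neg h1, if_neg h2]
    cases hts : pvTokens rest with
    | nil => exact absurd hts (pvTokens_ne_nil _)
    | cons t ts => simp [pvMapHead]

-- per-item: A's nested split folds = one call of B's scanner
theorem pvItem_eq (item : List Char) (s : PySem.Set String) :
    (PySem.Chars.splitOn item ['.', ' ']).foldl (fun st sent =>
        (PySem.Chars.splitOn sent [' ', '|', '|', ' ']).foldl (fun st atom =>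
          PySem.Set.add st (String.ofList atom)) st) s
      = pvScan item [] s := by
  rw [pvScan_eq]
  cases hts : pvTokens item with
  | nil => exact absurd hts (pvTokens_ne_nil _)
  | cons t ts =>
    simp only [pvMapHead, List.reverse_nil, List.nil_append]
    rw [← hts, pvTokens_eq, PySem.Set.update_map_eq_foldl_add]
    rw [List.flatMap_def, List.foldl_flatten, List.foldl_map]
    simp only [pvSplitOn_eq ['.', ' '] pvD1_ne, pvSplitOn_eq [' ', '|', '|', ' '] pvD2_ne]

-- the whole accumulation loop: A's set = B's set
theorem pvFold_eq (dl : List String) (s : PySem.Set String) :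
    dl.foldl (fun st item =>
      (PySem.Chars.splitOn item.toList ['.', ' ']).foldl (fun st sentence_item =>
        (PySem.Chars.splitOn sentence_item [' ', '|', '|', ' ']).foldl (fun st atomic_directive =>
          PySem.Set.add st (String.ofList atomic_directive)) st) st) s
      = dl.foldl (fun s item => pvScan item.toList [] s) s := by
  induction dl generalizing s with
  | nil => rfl
  | cons x xs ih => rw [List.foldl_cons, List.foldl_cons, pvItem_eq, ih]

-- ===== VERDICT (by name: the statement is the Claim_ definition above) =====
theorem split_and_sort_directive_spec : Claim_equal_split_and_sort_directive := by
  intro directive_list _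
  unfold Spec_split_and_sort_directive split_and_sort_directive split_and_sort_directive_alt
  exact congrArg (fun s => PySem.List.sorted s (fun directive => PySem.Str.len directive) false)
    (pvFold_eq directive_list PySem.Set.empty)
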